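-- pv_equiv track=rewrite | github.com/yaseen-asaliya/LeetCode-Problems-Solutions | 2124-check-if-all-as-appears-before-all-bs/2124-check-if-all-as-appears-before-all-bs.py | checkString
-- ===== SOURCE A (Python) =====
-- def checkString(s: str) -> bool:
--     saw_a = False
--
--     for i in range(len(s) - 1, -1, -1):
--         if s[i] == 'a':
--             saw_a = True
--         if s[i] == 'b' and saw_a:
--             return False
--
--     return True
-- ===== SOURCE B (Python) =====
-- def checkString(s: str) -> bool:
--     i = s.find('b')
--     return i == -1 or 'a' not in s[i:]
-- ===== Notes on version B (the rewrite author's own statement) =====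
-- stated objective: simpler
-- what changed: Replaces the backward index loop with a saw_a flag by a two-line boundary decomposition: locate the first b via str.find and test the suffix for the letter a.
import Mathlib
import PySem

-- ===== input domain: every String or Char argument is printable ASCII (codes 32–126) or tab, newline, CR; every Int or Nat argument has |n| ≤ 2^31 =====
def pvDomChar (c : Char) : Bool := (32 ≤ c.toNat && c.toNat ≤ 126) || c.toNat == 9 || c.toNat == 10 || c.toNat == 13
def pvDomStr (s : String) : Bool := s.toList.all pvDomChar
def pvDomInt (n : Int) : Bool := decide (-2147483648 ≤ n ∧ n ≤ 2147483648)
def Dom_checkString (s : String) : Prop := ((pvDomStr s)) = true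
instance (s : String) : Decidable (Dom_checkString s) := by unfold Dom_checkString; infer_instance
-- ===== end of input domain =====

-- ===== PORT A =====
-- B replaces the backward saw_a loop by find-the-first-b + suffix membership test; return values are equal.
-- A's backward index loop over s[len-1..0] is transliterated as structural recursion over the
-- reversed character list (the same characters in the same visiting order, same saw_a state).
def checkAuxA : List Char → Bool → Bool
  | [], _ => true
  | c :: rest, sawA =>
    let sawA := if c = 'a' then true else sawA
    if c = 'b' && sawA then false else checkAuxA rest sawA

def checkString (s : String) : Bool :=
  checkAuxA s.toList.reverse false

-- ===== PORT B =====
def checkString_alt (s : String) : Bool :=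
  if PySem.Str.find s "b" == -1 then true
  else !(PySem.Str.isIn "a" (PySem.Str.slice s (some (PySem.Str.find s "b")) none))

-- ===== PRECONDITION & SPEC =====
def Spec_checkString (s : String) (out : Bool) : Prop := out = checkString_alt s
instance (s : String) (out : Bool) : Decidable (Spec_checkString s out) := by unfold Spec_checkString; infer_instance

-- ===== CLAIM (what is proved, stated in full; the proofs are below) =====
def Claim_equal_checkString : Prop := ∀ (s : String), Dom_checkString s → Spec_checkString s (checkString s)

-- ===== LEMMAS AND PROOFS =====

-- "some 'a' occurs with a 'b' somewhere after it"
def hasAB : List Char → Bool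
  | [] => false
  | c :: rest => (c == 'a' && rest.contains 'b') || hasAB rest

-- "some 'b' occurs with an 'a' somewhere after it"
def hasBA : List Char → Bool
  | [] => false
  | c :: rest => (c == 'b' && rest.contains 'a') || hasBA rest

theorem checkAuxA_char (l : List Char) (sawA : Bool) :
    checkAuxA l sawA = !((sawA && l.contains 'b') || hasAB l) := by
  induction l generalizing sawA with
  | nil => simp [checkAuxA, hasAB]
  | cons c rest ih =>
    by_cases hb : c = 'b'
    · subst hb
      cases sawA <;> simp [checkAuxA, hasAB, ih]
    · by_cases ha : c = 'a'
      · subst ha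
        cases sawA <;> simp [checkAuxA, hasAB, ih]
      · simp only [checkAuxA, hasAB, ih, List.contains_cons]
        simp [ha, hb, beq_eq_false_iff_ne.mpr (Ne.symm hb), beq_eq_false_iff_ne.mpr ha]

theorem hasAB_append_singleton (l : List Char) (c : Char) :
    hasAB (l ++ [c]) = (hasAB l || (c == 'b' && l.contains 'a')) := by
  induction l with
  | nil => cases hc : (c == 'b') <;> simp [hasAB]
  | cons d rest ih =>
    simp only [List.cons_append, hasAB, ih, List.contains_append, List.contains_cons]
    by_cases hda : d = 'a' <;> by_cases hcb : c = 'b'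
    · subst hda; subst hcb
      simp [Bool.or_comm]
    · subst hda
      simp [beq_eq_false_iff_ne.mpr hcb, beq_eq_false_iff_ne.mpr (Ne.symm hcb), Bool.or_comm]
    · subst hcb
      simp [beq_eq_false_iff_ne.mpr hda, beq_eq_false_iff_ne.mpr (Ne.symm hda), Bool.or_comm]
    · simp [beq_eq_false_iff_ne.mpr hda, beq_eq_false_iff_ne.mpr (Ne.symm hda),
        beq_eq_false_iff_ne.mpr hcb, beq_eq_false_iff_ne.mpr (Ne.symm hcb)]

theorem hasAB_reverse (l : List Char) : hasAB l.reverse = hasBA l := by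
  induction l with
  | nil => rfl
  | cons c rest ih =>
    simp only [List.reverse_cons, hasAB_append_singleton, ih, hasBA, List.contains_reverse,
      Bool.or_comm]

theorem checkString_eq (s : String) : checkString s = !hasBA s.toList := by
  rw [checkString, checkAuxA_char, hasAB_reverse]
  simp

theorem hasBA_iff (l : List Char) :
    hasBA l = true ↔ ∃ k w, l.drop k = 'b' :: w ∧ 'a' ∈ w := by
  induction l with
  | nil => simp [hasBA]
  | cons c rest ih =>
    simp only [hasBA, Bool.or_eq_true, Bool.and_eq_true, beq_iff_eq, List.contains_eq_mem,
      decide_eq_true_eq, ih]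
    constructor
    · rintro (⟨hc, ha⟩ | ⟨k, w, hd, hw⟩)
      · exact ⟨0, rest, by simp [hc], ha⟩
      · exact ⟨k + 1, w, by simpa using hd, hw⟩
    · rintro ⟨k, w, hd, hw⟩
      cases k with
      | zero =>
        simp only [List.drop_zero, List.cons.injEq] at hd
        exact Or.inl ⟨hd.1, hd.2 ▸ hw⟩
      | succ k => exact Or.inr ⟨k, w, by simpa using hd, hw⟩

theorem alt_eq (s : String) : checkString_alt s = !hasBA s.toList := by
  unfold checkString_alt
  by_cases hfind : PySem.Str.find s "b" = -1
  · have hnb : ¬ ("b" : String).toList <:+: s.toList :=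
      (PySem.Str.find_eq_neg_one_iff s "b").mp hfind
    have hb : 'b' ∉ s.toList := by
      intro hmem
      exact hnb ((List.singleton_infix_iff 'b' s.toList).mpr hmem)
    have hno : hasBA s.toList = false := by
      rw [Bool.eq_false_iff]
      intro h
      obtain ⟨k, w, hd, -⟩ := (hasBA_iff s.toList).mp h
      exact hb (List.mem_of_mem_drop (hd ▸ List.mem_cons_self ..))
    rw [show (PySem.Str.find s "b" == -1) = true by rw [hfind]; rfl, if_pos rfl, hno]
    rfl
  · have hspec := PySem.Chars.findFrom_natCast_spec s.toList ("b" : String).toList 0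
      (Nat.zero_le _) (by simpa using hfind)
    simp only [Nat.cast_zero, PySem.Chars.findFrom_zero] at hspec
    have hfc : PySem.Str.find s "b" = PySem.Chars.find s.toList ("b" : String).toList := by
      simp
    set i := PySem.Chars.find s.toList ("b" : String).toList with hi
    obtain ⟨hnn, hpre, hmin⟩ := hspec
    have h0i : (0 : ℤ) ≤ i := by exact_mod_cast hnn
    obtain ⟨w, hw⟩ : ∃ w, s.toList.drop i.toNat = 'b' :: w := by
      obtain ⟨t, ht⟩ := hpre
      exact ⟨t, by simpa using ht.symm⟩
    have hslice : (PySem.Str.slice s (some (PySem.Str.find s "b")) none).toList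
        = s.toList.drop i.toNat := by
      rw [hfc]
      simp [PySem.List.slice_from _ h0i]
    have hIsIn : PySem.Str.isIn "a" (PySem.Str.slice s (some (PySem.Str.find s "b")) none) = true
        ↔ 'a' ∈ s.toList.drop i.toNat := by
      rw [PySem.Str.isIn_iff_infix, hslice]
      exact List.singleton_infix_iff 'a' _
    have hkey : hasBA s.toList = true ↔ 'a' ∈ s.toList.drop i.toNat := by
      rw [hasBA_iff]
      constructor
      · rintro ⟨k, v, hd, hv⟩
        have hik : i.toNat ≤ k := by
          by_contra hlt
          exact hmin k (Nat.zero_le _) (by omega) ⟨v, by simp [hd]⟩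
        have hmem : 'a' ∈ s.toList.drop k := hd ▸ List.mem_cons_of_mem _ hv
        have hdd : s.toList.drop k = (s.toList.drop i.toNat).drop (k - i.toNat) := by
          rw [List.drop_drop]
          congr 1
          omega
        rw [hdd] at hmem
        exact List.mem_of_mem_drop hmem
      · intro ha
        refine ⟨i.toNat, w, hw, ?_⟩
        rw [hw] at ha
        rcases List.mem_cons.mp ha with h | h
        · exact absurd h (by decide)
        · exact h
    rw [show (PySem.Str.find s "b" == -1) = false from beq_eq_false_iff_ne.mpr hfind]
    simp only [Bool.false_eq_true, if_false]
    cases hcase : hasBA s.toList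
    · have hna : 'a' ∉ s.toList.drop i.toNat := fun h => by simp [hkey.mpr h] at hcase
      have : PySem.Str.isIn "a" (PySem.Str.slice s (some (PySem.Str.find s "b")) none) = false := by
        rw [Bool.eq_false_iff]
        intro h
        exact hna (hIsIn.mp h)
      rw [this]
    · rw [hIsIn.mpr (hkey.mp hcase)]

-- ===== VERDICT (by name: the statement is the Claim_ definition above) =====
theorem checkString_spec : Claim_equal_checkString := by
  intro s _
  unfold Spec_checkString
  rw [checkString_eq, alt_eq]
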